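-- pv_equiv track=rewrite | github.com/ismoilovsamandar237-cmyk/python-homework | lesson-6/homework/task6.py | add_underscores
-- ===== SOURCE A (Python) =====
-- def add_underscores(txt):
--     vowels = "aeiouAEIOU"
--     result = ""
--     count = 0
--     i = 0
--
--     while i < len(txt):
--         ch = txt[i]
--         result += ch
--         count += 1
--
--         if count == 3:
--             if i != len(txt) - 1:
--                 if ch in vowels:
--                     result += txt[i + 1]
--                     i += 1
--                 result += "_"
--             count = 0
--
--         i += 1
--
--     if result.endswith("_"):
--         result = result[:-1]
--
--     return result
-- ===== SOURCE B (Python) =====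
-- def add_underscores(txt):
--     vowels = "aeiouAEIOU"
--     parts = []
--     p = 0
--     n = len(txt)
--     while p < n:
--         chunk = txt[p:p+3]
--         if len(chunk) < 3 or p + 3 == n:
--             parts.append(chunk)
--             break
--         parts.append(chunk)
--         if chunk[2] in vowels:
--             parts.append(txt[p+3])
--             p += 4
--         else:
--             p += 3
--         parts.append("_")
--     s = "".join(parts)
--     return s[:-1] if s.endswith("_") else s
-- ===== Notes on version B (the rewrite author's own statement) =====
-- stated objective: faster
-- what changed: Replaced the per-character loop with a modular group counter and quadratic string concatenation by a variable-stride chunk pointer that collects 3-char slices (plus a 4th char after a vowel-ended chunk) in a list, joins once, and strips one trailing underscore.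
import Mathlib
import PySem

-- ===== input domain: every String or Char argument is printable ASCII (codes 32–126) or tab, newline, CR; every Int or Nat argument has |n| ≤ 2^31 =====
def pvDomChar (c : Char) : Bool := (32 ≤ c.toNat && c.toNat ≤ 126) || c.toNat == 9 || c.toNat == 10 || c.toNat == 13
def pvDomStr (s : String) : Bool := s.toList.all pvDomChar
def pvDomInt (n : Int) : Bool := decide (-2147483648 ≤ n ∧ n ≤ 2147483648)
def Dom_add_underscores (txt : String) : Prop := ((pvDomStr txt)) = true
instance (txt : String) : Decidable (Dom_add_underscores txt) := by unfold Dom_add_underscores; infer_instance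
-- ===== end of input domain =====

-- B replaces A's per-character counter loop (with quadratic string +=) by variable-stride 3-char chunking collected into parts and joined once; a timing run measured B faster.

-- ===== PORT A =====
def pvVowels : List Char := "aeiouAEIOU".toList

-- A's while loop: i walks forward one char at a time (occasionally consuming the
-- following char too); modelled as recursion on the remaining suffix of txt,
-- with the same state (result accumulator, count).
def pvLoopA : List Char → List Char → Nat → List Char
  | [], result, _ => result
  | ch :: rest, result, count =>
    let result := result ++ [ch]
    let count := count + 1
    if count == 3 then
      match rest with
      | [] => result                    -- i == len(txt) - 1: no underscore
      | c2 :: rest2 =>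
        if ch ∈ pvVowels then pvLoopA rest2 (result ++ [c2] ++ ['_']) 0
        else pvLoopA (c2 :: rest2) (result ++ ['_']) 0
    else pvLoopA rest result count

def add_underscores (txt : String) : String :=
  let result := pvLoopA txt.toList [] 0
  -- result.endswith("_") / result[:-1] (exact for the one-char suffix)
  let result := if result.getLast? = some '_' then result.dropLast else result
  String.ofList result

-- ===== PORT B =====
-- B's pointer loop over chunks: the pattern a::b::c::d::rest is 'at least 4
-- chars remain' (chunk has 3 chars and p+3 ≠ n); otherwise emit the remainder
-- (the <3-chars or exactly-3-chars break).
def pvLoopB : List Char → List Char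
  | a :: b :: c :: d :: rest =>
    if c ∈ pvVowels then a :: b :: c :: d :: '_' :: pvLoopB rest
    else a :: b :: c :: '_' :: pvLoopB (d :: rest)
  | l => l

def add_underscores_alt (txt : String) : String :=
  let s := pvLoopB txt.toList
  -- s.endswith("_") / s[:-1]
  let s := if s.getLast? = some '_' then s.dropLast else s
  String.ofList s

-- ===== PRECONDITION & SPEC =====
def Spec_add_underscores (txt : String) (out : String) : Prop := out = add_underscores_alt txt
instance (txt : String) (out : String) : Decidable (Spec_add_underscores txt out) := by unfold Spec_add_underscores; infer_instance

-- ===== CLAIM (what is proved, stated in full; the proofs are below) =====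
def Claim_equal_add_underscores : Prop := ∀ (txt : String), Dom_add_underscores txt → Spec_add_underscores txt (add_underscores txt)

-- ===== LEMMAS AND PROOFS =====
theorem pvLoopA_eq_loopB (l : List Char) : ∀ acc, pvLoopA l acc 0 = acc ++ pvLoopB l := by
  induction l using pvLoopB.induct with
  | case1 a b c d rest hv ih =>
    intro acc
    simp only [pvLoopA, pvLoopB, if_pos hv]
    norm_num
    rw [ih]
    simp
  | case2 a b c d rest hv ih =>
    intro acc
    simp only [pvLoopA, pvLoopB, if_neg hv]
    norm_num
    rw [ih]
    simp
  | case3 l h =>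
    intro acc
    rcases l with _ | ⟨a, _ | ⟨b, _ | ⟨c, _ | ⟨d, rest⟩⟩⟩⟩
    · simp [pvLoopA, pvLoopB]
    · simp [pvLoopA, pvLoopB]
    · simp [pvLoopA, pvLoopB]
    · simp [pvLoopA, pvLoopB]
    · exact absurd rfl (h a b c d rest)

-- ===== VERDICT (by name: the statement is the Claim_ definition above) =====
theorem add_underscores_spec : Claim_equal_add_underscores := by
  intro txt _
  unfold Spec_add_underscores add_underscores add_underscores_alt
  rw [pvLoopA_eq_loopB]
  simp
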